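-- pv_equiv track=rewrite | github.com/marvinmirtschin/Gaitomator | src/core/visualization/visualizer.py | __sort_lists_equally
-- ===== SOURCE A (Python) =====
-- def __sort_lists_equally(sort_list, reference_list, ascending=False):
--     """Sort first list in the specified order. The second list will have its values ordered according to the changes in
--     the first list.
--     """
--     if len(sort_list) != len(reference_list):
--         return
--
--     result = {}
--     list_x = list(sort_list)
--     list_y = list(reference_list)
--     for i in range(len(sort_list)):
--         if ascending:
--             minimum_item = min(list_x)
--             index = list_x.index(minimum_item)
--         else:
--             maximum_item = max(list_x)
--             index = list_x.index(maximum_item)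
--         key = list_y[index]
--         result[key] = list_x[index]
--
--         del list_x[index]
--         del list_y[index]
--     return list(result.values()), list(result.keys())
-- ===== SOURCE B (Python) =====
-- def __sort_lists_equally(sort_list, reference_list, ascending=False):
--     """Sort first list in the specified order; reorder the second list in step.
--     One stable sort of the zipped pairs replaces A's repeated min/max selection."""
--     if len(sort_list) != len(reference_list):
--         return
--     result = {}
--     for value, key in sorted(zip(sort_list, reference_list),
--                              key=lambda p: p[0], reverse=not ascending):
--         result[key] = value
--     return list(result.values()), list(result.keys())
-- ===== Notes on version B (the rewrite author's own statement) =====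
-- stated objective: faster
-- what changed: A repeatedly scans the remaining list for its min/max and deletes it (quadratic selection); B stably sorts the zipped (value, reference) pairs once and inserts them into a dict in one pass, which reproduces the dedup-by-reference-key and ordering exactly.
import Mathlib
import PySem

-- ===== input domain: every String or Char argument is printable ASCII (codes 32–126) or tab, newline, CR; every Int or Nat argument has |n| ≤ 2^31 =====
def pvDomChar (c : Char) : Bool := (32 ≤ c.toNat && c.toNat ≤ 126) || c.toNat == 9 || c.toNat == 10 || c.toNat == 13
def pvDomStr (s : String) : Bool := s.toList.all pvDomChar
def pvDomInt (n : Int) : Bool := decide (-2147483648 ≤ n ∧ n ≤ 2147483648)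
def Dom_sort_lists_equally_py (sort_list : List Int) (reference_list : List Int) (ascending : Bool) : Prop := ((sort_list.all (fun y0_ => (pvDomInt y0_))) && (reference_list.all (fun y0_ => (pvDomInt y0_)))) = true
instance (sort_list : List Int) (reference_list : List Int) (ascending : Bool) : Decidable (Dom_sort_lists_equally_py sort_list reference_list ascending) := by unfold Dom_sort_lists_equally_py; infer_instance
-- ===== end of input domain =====

-- ===== PORT A =====
-- B replaces A's quadratic repeated min/max selection with one stable sort of the zipped pairs (objective: faster).
-- one iteration of A's `for i in range(len(sort_list))` loop (the loop variable is unused by the body)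
def pyAStep (ascending : Bool) (s : PySem.Dict Int Int × List Int × List Int) (_i : Int) :
    PySem.Dict Int Int × List Int × List Int :=
  let result := s.1
  let list_x := s.2.1
  let list_y := s.2.2
  match (if ascending then PySem.List.min? list_x (fun v => v) else PySem.List.max? list_x (fun v => v)) with
  | none => s        -- unreachable in Python: list_x is nonempty at every iteration
  | some item =>
    match PySem.List.index? list_x item with
    | none => s      -- unreachable: item ∈ list_x
    | some index =>
      (result.insert (PySem.List.pyGetD list_y (index : Int) 0) (PySem.List.pyGetD list_x (index : Int) 0),
       list_x.eraseIdx index, list_y.eraseIdx index)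

def sort_lists_equally_py (sort_list : List Int) (reference_list : List Int) (ascending : Bool) :
    Option (List Int × List Int) :=
  if sort_list.length ≠ reference_list.length then none
  else
    some (((PySem.List.pyRange 0 (sort_list.length : Int) 1).foldl (pyAStep ascending)
             (PySem.Dict.empty, sort_list, reference_list)).1.values,
          ((PySem.List.pyRange 0 (sort_list.length : Int) 1).foldl (pyAStep ascending)
             (PySem.Dict.empty, sort_list, reference_list)).1.keys)

-- ===== PORT B =====
def sort_lists_equally_py_alt (sort_list : List Int) (reference_list : List Int) (ascending : Bool) :
    Option (List Int × List Int) :=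
  if sort_list.length ≠ reference_list.length then none
  else
    some (((PySem.List.sorted (sort_list.zip reference_list) (fun p => p.1) (!ascending)).foldl
             (fun (d : PySem.Dict Int Int) p => d.insert p.2 p.1) PySem.Dict.empty).values,
          ((PySem.List.sorted (sort_list.zip reference_list) (fun p => p.1) (!ascending)).foldl
             (fun (d : PySem.Dict Int Int) p => d.insert p.2 p.1) PySem.Dict.empty).keys)

-- ===== PRECONDITION & SPEC =====
def Spec_sort_lists_equally_py (sort_list : List Int) (reference_list : List Int) (ascending : Bool) (out : Option (List Int × List Int)) : Prop := out = sort_lists_equally_py_alt sort_list reference_list ascending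
instance (sort_list : List Int) (reference_list : List Int) (ascending : Bool) (out : Option (List Int × List Int)) : Decidable (Spec_sort_lists_equally_py sort_list reference_list ascending out) := by unfold Spec_sort_lists_equally_py; infer_instance

-- ===== CLAIM (what is proved, stated in full; the proofs are below) =====
def Claim_equal_sort_lists_equally_py : Prop := ∀ (sort_list : List Int) (reference_list : List Int) (ascending : Bool), Dom_sort_lists_equally_py sort_list reference_list ascending → Spec_sort_lists_equally_py sort_list reference_list ascending (sort_lists_equally_py sort_list reference_list ascending)

-- ===== LEMMAS AND PROOFS =====

-- membership in an insertion-sort fold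
theorem mem_foldl_insertBy {alpha : Type} (before : alpha → alpha → Bool) :
    ∀ (L acc : List alpha) (z : alpha),
      z ∈ L.foldl (fun acc x => PySem.List.insertBy before x acc) acc → z ∈ acc ∨ z ∈ L := by
  intro L
  induction L with
  | nil => intro acc z h; exact Or.inl h
  | cons a L ih =>
    intro acc z h
    rcases ih _ z h with h' | h'
    · rcases (PySem.List.mem_insertBy before a z acc).mp h' with h'' | h''
      · exact Or.inr (by simp [h''])
      · exact Or.inl h''
    · exact Or.inr (List.mem_cons_of_mem _ h')

theorem insertBy_cons_of_before {alpha : Type} (before : alpha → alpha → Bool) (x y : alpha) (ys : List alpha)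
    (h : before x y = true) :
    PySem.List.insertBy before x (y :: ys) = x :: y :: ys := by
  simp [PySem.List.insertBy, h]

theorem insertBy_cons_of_not_before {alpha : Type} (before : alpha → alpha → Bool) (x y : alpha) (ys : List alpha)
    (h : before x y = false) :
    PySem.List.insertBy before x (y :: ys) = y :: PySem.List.insertBy before x ys := by
  simp [PySem.List.insertBy, h]

theorem foldl_insertBy_skip {alpha : Type} (before : alpha → alpha → Bool) (x : alpha) :
    ∀ (r acc : List alpha), (∀ z ∈ r, before z x = false) →
      r.foldl (fun acc z => PySem.List.insertBy before z acc) (x :: acc)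
        = x :: r.foldl (fun acc z => PySem.List.insertBy before z acc) acc := by
  intro r
  induction r with
  | nil => intro acc _; rfl
  | cons a r ih =>
    intro acc hr
    simp only [List.foldl_cons]
    rw [insertBy_cons_of_not_before before a x acc (hr a (by simp))]
    exact ih _ (fun z hz => hr z (List.mem_cons_of_mem _ hz))

-- the first extremal element of l ++ x :: r heads the insertion sort
theorem foldl_insertBy_first {alpha : Type} (before : alpha → alpha → Bool) (x : alpha) (l r : List alpha)
    (hl : ∀ y ∈ l, before x y = true) (hr : ∀ y ∈ r, before y x = false) :
    (l ++ x :: r).foldl (fun acc z => PySem.List.insertBy before z acc) []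
      = x :: (l ++ r).foldl (fun acc z => PySem.List.insertBy before z acc) [] := by
  rw [List.foldl_append, List.foldl_append, List.foldl_cons]
  set sL := l.foldl (fun acc z => PySem.List.insertBy before z acc) [] with hsL
  have hins : PySem.List.insertBy before x sL = x :: sL := by
    match h : sL with
    | [] => simp [PySem.List.insertBy]
    | y :: t =>
      have hy : y ∈ l := by
        have := mem_foldl_insertBy before l [] y (by rw [← hsL]; simp)
        simpa using this
      exact insertBy_cons_of_before before x y t (hl y hy)
  rw [hins]
  exact foldl_insertBy_skip before x r sL hr

theorem sorted_first_min {alpha : Type} (key : alpha → Int) (x : alpha) (l r : List alpha)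
    (hl : ∀ y ∈ l, key x < key y) (hr : ∀ y ∈ r, key x ≤ key y) :
    PySem.List.sorted (l ++ x :: r) key false = x :: PySem.List.sorted (l ++ r) key false := by
  rw [PySem.List.sorted_eq_foldl_insertBy, PySem.List.sorted_eq_foldl_insertBy]
  exact foldl_insertBy_first _ x l r
    (fun y hy => by simpa using hl y hy)
    (fun y hy => by simpa using not_lt.mpr (hr y hy))

theorem sorted_first_max {alpha : Type} (key : alpha → Int) (x : alpha) (l r : List alpha)
    (hl : ∀ y ∈ l, key y < key x) (hr : ∀ y ∈ r, key y ≤ key x) :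
    PySem.List.sorted (l ++ x :: r) key true = x :: PySem.List.sorted (l ++ r) key true := by
  rw [PySem.List.sorted_rev_eq_foldl_insertBy, PySem.List.sorted_rev_eq_foldl_insertBy]
  exact foldl_insertBy_first _ x l r
    (fun y hy => by simpa using hl y hy)
    (fun y hy => by simpa using not_lt.mpr (hr y hy))

-- A's selection loop computes the same dict as folding the stable sort of the zipped pairs
theorem loop_eq_asc :
    ∀ (L : List Int) (xs ys : List Int) (d : PySem.Dict Int Int),
      xs.length = ys.length → L.length = xs.length →
      (L.foldl (pyAStep true) (d, xs, ys)).1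
        = (PySem.List.sorted (xs.zip ys) (fun p => p.1) false).foldl
            (fun (d : PySem.Dict Int Int) p => d.insert p.2 p.1) d := by
  intro L
  induction L with
  | nil =>
    intro xs ys d hxy hlen
    have hx : xs = [] := List.eq_nil_iff_length_eq_zero.mpr hlen.symm
    have hy : ys = [] := List.eq_nil_iff_length_eq_zero.mpr (by rw [← hxy]; exact hlen.symm)
    rw [hx, hy]; rfl
  | cons i L ih =>
    intro xs ys d hxy hlen
    have hne : xs ≠ [] := by intro h; rw [h] at hlen; simp at hlen
    cases hm : PySem.List.min? xs (fun v => v) with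
    | none => exact absurd ((PySem.List.min?_eq_none_iff xs _).mp hm) hne
    | some m =>
    have hmem : m ∈ xs := PySem.List.min?_mem hm
    have hmin : ∀ y ∈ xs, m ≤ y := fun y hy => PySem.List.min?_isMin hm y hy
    cases hidx : PySem.List.index? xs m with
    | none => exact absurd hmem ((PySem.List.index?_eq_none_iff xs m).mp hidx)
    | some idx =>
    obtain ⟨pre, suf, hxs, hprelen, hmpre⟩ := (PySem.List.index?_eq_some_iff xs m idx).mp hidx
    obtain ⟨hidxlt, hxm, -⟩ := PySem.List.getElem_of_index?_eq_some hidx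
    have hidxy : idx < ys.length := hxy ▸ hidxlt
    have hys : ys = ys.take idx ++ ys[idx] :: ys.drop (idx + 1) := by
      conv_lhs => rw [← List.take_append_drop idx ys]
      rw [List.drop_eq_getElem_cons hidxy]
    have hyplen : pre.length = (ys.take idx).length := by
      simp [hprelen, Nat.min_eq_left hidxy.le]
    have hidx' : List.idxOf? m xs = some idx := by
      simpa [PySem.List.index?_eq_idxOf?] using hidx
    have hstep : pyAStep true (d, xs, ys) i
        = (d.insert ys[idx] m, xs.eraseIdx idx, ys.eraseIdx idx) := by
      simp [pyAStep, hm, hidx', hidxy, hidxlt, hxm]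
    have hxerase : xs.eraseIdx idx = pre ++ suf := by
      rw [List.eraseIdx_eq_take_drop_succ, hxs, ← hprelen, List.take_left]
      congr 1
      have h2 : pre ++ m :: suf = (pre ++ [m]) ++ suf := by simp
      have h3 : (pre ++ [m]).length = pre.length + 1 := by simp
      rw [h2, ← h3, List.drop_left]
    have hyerase : ys.eraseIdx idx = ys.take idx ++ ys.drop (idx + 1) :=
      List.eraseIdx_eq_take_drop_succ ys idx
    have hzip : xs.zip ys
        = (pre.zip (ys.take idx)) ++ ((m, ys[idx]) :: (suf.zip (ys.drop (idx + 1)))) := by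
      conv_lhs => rw [hxs, hys]
      rw [List.zip_append hyplen, List.zip_cons_cons]
    have hl : ∀ p ∈ pre.zip (ys.take idx), (fun p : Int × Int => p.1) (m, ys[idx]) < p.1 := by
      intro p hp
      have hp1 : p.1 ∈ pre := (List.of_mem_zip (a := p.1) (b := p.2) hp).1
      have hle : m ≤ p.1 := hmin p.1 (by rw [hxs]; exact List.mem_append_left _ hp1)
      exact lt_of_le_of_ne hle (fun e => hmpre (by rw [show m = p.1 from e]; exact hp1))
    have hr : ∀ p ∈ suf.zip (ys.drop (idx + 1)), (fun p : Int × Int => p.1) (m, ys[idx]) ≤ p.1 := by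
      intro p hp
      have hp1 : p.1 ∈ suf := (List.of_mem_zip (a := p.1) (b := p.2) hp).1
      exact hmin p.1 (by rw [hxs]; exact List.mem_append_right _ (List.mem_cons_of_mem _ hp1))
    have hlen1 : (xs.eraseIdx idx).length = (ys.eraseIdx idx).length := by
      rw [List.length_eraseIdx_of_lt hidxlt, List.length_eraseIdx_of_lt hidxy, hxy]
    have hlen2 : L.length = (xs.eraseIdx idx).length := by
      rw [List.length_eraseIdx_of_lt hidxlt]
      simp at hlen
      omega
    rw [List.foldl_cons, hstep, ih _ _ _ hlen1 hlen2, hxerase, hyerase,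
        List.zip_append hyplen, hzip,
        sorted_first_min (fun p : Int × Int => p.1) (m, ys[idx]) _ _ hl hr, List.foldl_cons]

theorem loop_eq_desc :
    ∀ (L : List Int) (xs ys : List Int) (d : PySem.Dict Int Int),
      xs.length = ys.length → L.length = xs.length →
      (L.foldl (pyAStep false) (d, xs, ys)).1
        = (PySem.List.sorted (xs.zip ys) (fun p => p.1) true).foldl
            (fun (d : PySem.Dict Int Int) p => d.insert p.2 p.1) d := by
  intro L
  induction L with
  | nil =>
    intro xs ys d hxy hlen
    have hx : xs = [] := List.eq_nil_iff_length_eq_zero.mpr hlen.symm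
    have hy : ys = [] := List.eq_nil_iff_length_eq_zero.mpr (by rw [← hxy]; exact hlen.symm)
    rw [hx, hy]; rfl
  | cons i L ih =>
    intro xs ys d hxy hlen
    have hne : xs ≠ [] := by intro h; rw [h] at hlen; simp at hlen
    cases hm : PySem.List.max? xs (fun v => v) with
    | none => exact absurd ((PySem.List.max?_eq_none_iff xs _).mp hm) hne
    | some m =>
    have hmem : m ∈ xs := PySem.List.max?_mem hm
    have hmax : ∀ y ∈ xs, y ≤ m := fun y hy => PySem.List.max?_isMax hm y hy
    cases hidx : PySem.List.index? xs m with
    | none => exact absurd hmem ((PySem.List.index?_eq_none_iff xs m).mp hidx)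
    | some idx =>
    obtain ⟨pre, suf, hxs, hprelen, hmpre⟩ := (PySem.List.index?_eq_some_iff xs m idx).mp hidx
    obtain ⟨hidxlt, hxm, -⟩ := PySem.List.getElem_of_index?_eq_some hidx
    have hidxy : idx < ys.length := hxy ▸ hidxlt
    have hys : ys = ys.take idx ++ ys[idx] :: ys.drop (idx + 1) := by
      conv_lhs => rw [← List.take_append_drop idx ys]
      rw [List.drop_eq_getElem_cons hidxy]
    have hyplen : pre.length = (ys.take idx).length := by
      simp [hprelen, Nat.min_eq_left hidxy.le]
    have hidx' : List.idxOf? m xs = some idx := by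
      simpa [PySem.List.index?_eq_idxOf?] using hidx
    have hstep : pyAStep false (d, xs, ys) i
        = (d.insert ys[idx] m, xs.eraseIdx idx, ys.eraseIdx idx) := by
      simp [pyAStep, hm, hidx', hidxy, hidxlt, hxm]
    have hxerase : xs.eraseIdx idx = pre ++ suf := by
      rw [List.eraseIdx_eq_take_drop_succ, hxs, ← hprelen, List.take_left]
      congr 1
      have h2 : pre ++ m :: suf = (pre ++ [m]) ++ suf := by simp
      have h3 : (pre ++ [m]).length = pre.length + 1 := by simp
      rw [h2, ← h3, List.drop_left]
    have hyerase : ys.eraseIdx idx = ys.take idx ++ ys.drop (idx + 1) :=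
      List.eraseIdx_eq_take_drop_succ ys idx
    have hzip : xs.zip ys
        = (pre.zip (ys.take idx)) ++ ((m, ys[idx]) :: (suf.zip (ys.drop (idx + 1)))) := by
      conv_lhs => rw [hxs, hys]
      rw [List.zip_append hyplen, List.zip_cons_cons]
    have hl : ∀ p ∈ pre.zip (ys.take idx), (fun p : Int × Int => p.1) p < m := by
      intro p hp
      have hp1 : p.1 ∈ pre := (List.of_mem_zip (a := p.1) (b := p.2) hp).1
      have hle : p.1 ≤ m := hmax p.1 (by rw [hxs]; exact List.mem_append_left _ hp1)
      exact lt_of_le_of_ne hle (fun e => hmpre (by rw [← show p.1 = m from e]; exact hp1))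
    have hr : ∀ p ∈ suf.zip (ys.drop (idx + 1)), (fun p : Int × Int => p.1) p ≤ m := by
      intro p hp
      have hp1 : p.1 ∈ suf := (List.of_mem_zip (a := p.1) (b := p.2) hp).1
      exact hmax p.1 (by rw [hxs]; exact List.mem_append_right _ (List.mem_cons_of_mem _ hp1))
    have hlen1 : (xs.eraseIdx idx).length = (ys.eraseIdx idx).length := by
      rw [List.length_eraseIdx_of_lt hidxlt, List.length_eraseIdx_of_lt hidxy, hxy]
    have hlen2 : L.length = (xs.eraseIdx idx).length := by
      rw [List.length_eraseIdx_of_lt hidxlt]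
      simp at hlen
      omega
    rw [List.foldl_cons, hstep, ih _ _ _ hlen1 hlen2, hxerase, hyerase,
        List.zip_append hyplen, hzip,
        sorted_first_max (fun p : Int × Int => p.1) (m, ys[idx]) _ _ hl hr, List.foldl_cons]

theorem loop_eq (ascending : Bool) :
    ∀ (L : List Int) (xs ys : List Int) (d : PySem.Dict Int Int),
      xs.length = ys.length → L.length = xs.length →
      (L.foldl (pyAStep ascending) (d, xs, ys)).1
        = (PySem.List.sorted (xs.zip ys) (fun p => p.1) (!ascending)).foldl
            (fun (d : PySem.Dict Int Int) p => d.insert p.2 p.1) d := by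
  cases ascending
  · exact loop_eq_desc
  · exact loop_eq_asc

-- ===== VERDICT (by name: the statement is the Claim_ definition above) =====
theorem sort_lists_equally_py_spec : Claim_equal_sort_lists_equally_py := by
  intro sort_list reference_list ascending _
  unfold Spec_sort_lists_equally_py sort_lists_equally_py sort_lists_equally_py_alt
  by_cases hlen : sort_list.length = reference_list.length
  · have hL : (PySem.List.pyRange 0 (sort_list.length : Int) 1).length = sort_list.length := by
      simp [PySem.List.length_pyRange_one]
    rw [if_neg (by simp [hlen]), if_neg (by simp [hlen])]
    rw [loop_eq ascending _ sort_list reference_list PySem.Dict.empty hlen hL]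
  · rw [if_pos hlen, if_pos hlen]
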